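-- pv_equiv track=rewrite | github.com/joolstorrentecalo/analytics | orchestration/temp.py | get_role_inheritances
-- ===== SOURCE A (Python) =====
-- def get_role_inheritances(role_name: str, roles_list: list) -> list:
--         """
--         Traverse list of dictionaries with snowflake roles to compile role inheritances
--         """
--         role_inheritances = next(
--             (
--                 role[role_name].get("member_of", [])
--                 for role in roles_list
--                 if role.get(role_name)
--             ),
--             [],
--         )
--         return role_inheritances + [
--             inherited
--             for direct in role_inheritances
--             for inherited in get_role_inheritances(direct, roles_list)
--         ]
-- ===== SOURCE B (Python) =====
-- def get_role_inheritances(role_name: str, roles_list: list) -> list: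
--     """Iterative DFS with an explicit stack instead of recursion."""
--     def members(name):
--         for role in roles_list:
--             v = role.get(name)
--             if v:
--                 return v.get("member_of", [])
--         return []
--
--     result = []
--     stack = [role_name]
--     while stack:
--         name = stack.pop()
--         ms = members(name)
--         result += ms
--         stack.extend(reversed(ms))
--     return result
-- ===== Notes on version B (the rewrite author's own statement) =====
-- stated objective: alternative
-- what changed: Replaces A's recursion (direct members plus flat-mapped recursive subtrees) by an iterative DFS with an explicit stack that pops a role, appends its members to the result and pushes them in reverse, reproducing the same order and duplicates; Pre_ excludes cyclic role graphs, on which A raises RecursionError (and B's loop never terminates).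
import Mathlib
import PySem

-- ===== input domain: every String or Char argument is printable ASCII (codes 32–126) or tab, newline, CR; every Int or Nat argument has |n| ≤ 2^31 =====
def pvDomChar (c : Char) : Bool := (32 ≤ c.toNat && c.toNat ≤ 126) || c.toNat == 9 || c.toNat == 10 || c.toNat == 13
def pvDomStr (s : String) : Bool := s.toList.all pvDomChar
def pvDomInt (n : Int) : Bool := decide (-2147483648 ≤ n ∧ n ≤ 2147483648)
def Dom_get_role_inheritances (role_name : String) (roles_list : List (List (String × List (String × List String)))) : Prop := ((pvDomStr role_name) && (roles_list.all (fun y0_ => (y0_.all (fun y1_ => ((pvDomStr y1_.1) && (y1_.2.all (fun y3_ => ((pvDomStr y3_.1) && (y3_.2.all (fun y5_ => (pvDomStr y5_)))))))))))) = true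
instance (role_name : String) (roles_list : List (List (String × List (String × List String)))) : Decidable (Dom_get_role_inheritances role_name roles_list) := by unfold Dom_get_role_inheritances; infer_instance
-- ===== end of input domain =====

-- B replaces A's recursion by an iterative DFS with an explicit stack (same order,
-- duplicates included); objective: alternative decomposition, same complexity.
-- Pre_ excludes inputs whose role graph has a path of length K+2 from the root
-- (K = total number of keys): by pigeonhole such a path repeats a role, i.e. the
-- graph reachable from role_name is cyclic, and there Python A raises RecursionError.


-- first-match association-list lookup: Python's role.get(name) / v.get("member_of")
def pvLookup {α : Type} (d : List (String × α)) (k : String) : Option α :=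
  match d with
  | [] => none
  | (k', v) :: rest => if k' = k then some v else pvLookup rest k

-- the scan both Pythons perform: A's `next((role[n].get("member_of", []) for role in roles if role.get(n)), [])`
-- and B's helper `members(name)` — first role whose value at `name` is a NON-EMPTY dict (Python truthiness), else [].
def pvMembers (roles : List (List (String × List (String × List String)))) (name : String) : List String :=
  match roles with
  | [] => []
  | r :: rs =>
    match pvLookup r name with
    | some d => if d = [] then pvMembers rs name else (pvLookup d "member_of").getD []
    | none => pvMembers rs name

-- K + 2, a recursion-depth bound sufficient on every input admitted by Pre_
def pvDepth (roles : List (List (String × List (String × List String)))) : Nat :=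
  (roles.map List.length).sum + 2

-- ===== PORT A =====
-- A's unbounded recursion, made total by a fuel guard (fuel = pvDepth, enough under Pre_)
def pvAFuel (fuel : Nat) (name : String) (roles : List (List (String × List (String × List String)))) : List String :=
  match fuel with
  | 0 => []
  | f + 1 =>
    let ri := pvMembers roles name
    ri ++ ri.flatMap (fun direct => pvAFuel f direct roles)

def get_role_inheritances (role_name : String) (roles_list : List (List (String × List (String × List String)))) : List String :=
  pvAFuel (pvDepth roles_list) role_name roles_list

-- ===== PORT B =====
-- B's while-loop; stack head = top (stack.pop() from the end + extend(reversed(ms))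
-- ≡ pop the head and prepend ms). Fuel counts loop iterations; none = fuel ran out
-- (never happens under Pre_ with the pvBBound fuel below).
def pvBLoop (fuel : Nat) (roles : List (List (String × List (String × List String))))
    (stack result : List String) : Option (List String) :=
  match stack with
  | [] => some result
  | name :: st =>
    match fuel with
    | 0 => none
    | f + 1 =>
      let ms := pvMembers roles name
      pvBLoop f roles (ms ++ st) (result ++ ms)

-- an iteration-count bound for the loop (exact under Pre_), used only as fuel
def pvBBound (d : Nat) (name : String) (roles : List (List (String × List (String × List String)))) : Nat :=
  match d with
  | 0 => 1
  | d + 1 => 1 + ((pvMembers roles name).map (fun y => pvBBound d y roles)).sum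

def get_role_inheritances_alt (role_name : String) (roles_list : List (List (String × List (String × List String)))) : List String :=
  (pvBLoop (pvBBound (pvDepth roles_list) role_name roles_list) roles_list [role_name] []).getD []

-- ===== PRECONDITION & SPEC =====
-- pvFrontier d l = role names reachable in exactly d inheritance steps from l (with multiplicity)
def pvFrontier (roles : List (List (String × List (String × List String)))) : Nat → List String → List String
  | 0, l => l
  | d + 1, l => pvFrontier roles d (l.flatMap (fun y => pvMembers roles y))

-- Pre_ excludes exactly the inputs with an inheritance path of length K+2 from role_name
-- (K = total key count): such a path must revisit a role, so the graph A recurses through is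
-- cyclic and Python A raises RecursionError there (B's Python loop does not terminate either).
def Pre_get_role_inheritances (role_name : String) (roles_list : List (List (String × List (String × List String)))) : Prop :=
  pvFrontier roles_list (pvDepth roles_list) [role_name] = []
instance (role_name : String) (roles_list : List (List (String × List (String × List String)))) : Decidable (Pre_get_role_inheritances role_name roles_list) := by unfold Pre_get_role_inheritances; infer_instance

def pvWitness_get_role_inheritances : String × (List (List (String × List (String × List String)))) :=
  ("a", [[("a", [("member_of", ["b", "c"])])], [("b", [("member_of", ["c"])])]])

def Spec_get_role_inheritances (role_name : String) (roles_list : List (List (String × List (String × List String)))) (out : List String) : Prop := out = get_role_inheritances_alt role_name roles_list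
instance (role_name : String) (roles_list : List (List (String × List (String × List String)))) (out : List String) : Decidable (Spec_get_role_inheritances role_name roles_list out) := by unfold Spec_get_role_inheritances; infer_instance

-- ===== CLAIM (what is proved, stated in full; the proofs are below) =====
def Claim_equal_get_role_inheritances : Prop := ∀ (role_name : String) (roles_list : List (List (String × List (String × List String)))), Dom_get_role_inheritances role_name roles_list → Pre_get_role_inheritances role_name roles_list → Spec_get_role_inheritances role_name roles_list (get_role_inheritances role_name roles_list)

-- ===== LEMMAS AND PROOFS =====

theorem pvFrontier_append (roles : List (List (String × List (String × List String)))) (d : Nat) :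
    ∀ l₁ l₂, pvFrontier roles d (l₁ ++ l₂) = pvFrontier roles d l₁ ++ pvFrontier roles d l₂ := by
  induction d with
  | zero => intro l₁ l₂; rfl
  | succ d ih => intro l₁ l₂; simp [pvFrontier, List.flatMap_append, ih]

theorem pvFrontier_mem_nil (roles : List (List (String × List (String × List String)))) (d : Nat)
    (l : List String) (h : pvFrontier roles d l = []) :
    ∀ y ∈ l, pvFrontier roles d [y] = [] := by
  induction l with
  | nil => intro y hy; cases hy
  | cons z zs ih =>
    have hz : pvFrontier roles d ([z] ++ zs) = [] := h
    rw [pvFrontier_append] at hz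
    rcases List.append_eq_nil_iff.mp hz with ⟨h1, h2⟩
    intro y hy
    rcases List.mem_cons.mp hy with rfl | hy'
    · exact h1
    · exact ih h2 y hy'

-- the heart: under "depth d suffices for x", popping x consumes exactly pvBBound d x fuel
-- and appends exactly A's recursive result pvAFuel d x
theorem pvStep (roles : List (List (String × List (String × List String)))) :
    ∀ d (x : String), pvFrontier roles d [x] = [] →
      ∀ st acc f, pvBLoop (pvBBound d x roles + f) roles (x :: st) acc
        = pvBLoop f roles st (acc ++ pvAFuel d x roles) := by
  intro d
  induction d with
  | zero =>
    intro x hx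
    simp [pvFrontier] at hx
  | succ d ih =>
    -- inner lemma: processing a whole block of names ms at depth d
    have multi : ∀ ms : List String, (∀ y ∈ ms, pvFrontier roles d [y] = []) →
        ∀ st acc f, pvBLoop ((ms.map (fun y => pvBBound d y roles)).sum + f) roles (ms ++ st) acc
          = pvBLoop f roles st (acc ++ ms.flatMap (fun y => pvAFuel d y roles)) := by
      intro ms
      induction ms with
      | nil => intro _ st acc f; simp
      | cons y rest ihm =>
        intro hall st acc f
        have hy := hall y (by simp)
        have hrest : ∀ z ∈ rest, pvFrontier roles d [z] = [] := fun z hz => hall z (by simp [hz])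
        have : pvBBound d y roles + ((rest.map (fun y => pvBBound d y roles)).sum + f)
            = ((y :: rest).map (fun y => pvBBound d y roles)).sum + f := by
          simp; ring
        rw [← this]
        have := ih y hy (rest ++ st) acc ((rest.map (fun y => pvBBound d y roles)).sum + f)
        rw [List.cons_append]
        rw [this, ihm hrest, List.flatMap_cons, ← List.append_assoc]
    intro x hx st acc f
    have hms : pvFrontier roles d (pvMembers roles x) = [] := by
      simpa [pvFrontier] using hx
    have hall : ∀ y ∈ pvMembers roles x, pvFrontier roles d [y] = [] :=
      pvFrontier_mem_nil roles d _ hms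
    -- one loop iteration, then the block
    have hfuel : pvBBound (d + 1) x roles + f
        = (((pvMembers roles x).map (fun y => pvBBound d y roles)).sum + f) + 1 := by
      simp [pvBBound]; ring
    rw [hfuel]
    show pvBLoop ((((pvMembers roles x).map (fun y => pvBBound d y roles)).sum + f) + 1) roles (x :: st) acc = _
    rw [show ∀ g, pvBLoop (g + 1) roles (x :: st) acc
          = pvBLoop g roles (pvMembers roles x ++ st) (acc ++ pvMembers roles x)
        from fun g => rfl]
    rw [multi _ hall st (acc ++ pvMembers roles x) f]
    simp [pvAFuel]

-- ===== VERDICT (by name: the statement is the Claim_ definition above) =====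
theorem get_role_inheritances_spec : Claim_equal_get_role_inheritances := by
  intro role_name roles_list _ hpre
  unfold Spec_get_role_inheritances
  unfold Pre_get_role_inheritances at hpre
  have h := pvStep roles_list (pvDepth roles_list) role_name hpre [] [] 0
  unfold get_role_inheritances get_role_inheritances_alt
  rw [Nat.add_zero] at h
  rw [h]
  rfl
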